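-- pv_equiv track=rewrite | github.com/akakss225/Python_tutorial | test.py | solution
-- ===== SOURCE A (Python) =====
-- def solution(p):
--     answer = 0
--     dp = [False] * len(p)
--     for i in range(len(p)):
--         idx = [i]
--         while idx:
--             cur_idx = idx.pop()
--             if p[cur_idx] == "<":
--                 if cur_idx == 0:
--                     dp[i] = True
--                     break
--                 else:
--                     next_idx = cur_idx - 1
--                     if p[next_idx] == ">":
--                         break
--                     else:
--                         if dp[next_idx] == True:
--                             dp[i] = True
--                             break
--                         idx.append(next_idx)
--             else:
--                 if cur_idx == len(p)-1:
--                     dp[i] = True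
--                     break
--                 else:
--                     next_idx = cur_idx + 1
--                     if p[next_idx] == "<":
--                         break
--                     else:
--                         if dp[next_idx] == True:
--                             dp[i] = True
--                         idx.append(next_idx)
--         if dp[i] == True:
--             answer += 1
--     return answer
-- ===== SOURCE B (Python) =====
-- def solution(p):
--     n = len(p)
--     a = 0
--     while a < n and p[a] == "<":
--         a += 1
--     b = 0
--     while b < n and p[n - 1 - b] != "<":
--         b += 1
--     return a + b
-- ===== Notes on version B (the rewrite author's own statement) =====
-- stated objective: faster
-- what changed: Replaced the per-position arrow-walk simulation (outer loop over all positions, each walking to a boundary) by a closed-form two-counter pass: the reachable positions are exactly the maximal all-'<' prefix plus the maximal '<'-free suffix, so B returns leading-'<' count + trailing non-'<' count.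
import Mathlib
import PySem

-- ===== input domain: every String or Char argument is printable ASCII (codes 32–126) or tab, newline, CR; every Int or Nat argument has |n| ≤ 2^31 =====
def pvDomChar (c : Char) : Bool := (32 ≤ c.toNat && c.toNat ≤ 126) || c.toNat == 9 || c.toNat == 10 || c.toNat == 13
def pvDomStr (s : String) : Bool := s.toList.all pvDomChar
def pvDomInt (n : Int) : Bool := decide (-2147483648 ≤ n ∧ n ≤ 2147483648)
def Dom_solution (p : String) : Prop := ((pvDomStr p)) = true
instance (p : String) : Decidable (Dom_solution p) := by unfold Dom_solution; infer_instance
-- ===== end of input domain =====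

-- B replaces A's per-position arrow-walk simulation by one two-counter pass (leading-'<' count
-- plus trailing non-'<' count); the return values are proved equal on all inputs.

-- ===== PORT A =====
-- the inner `while idx:` loop of A; `fuel` only makes the recursion total (2*len(p)+2 always
-- suffices, proved below); the list `idx` is Python's explicit stack, `dp` the memo list.
def solLoop (s : List Char) (fuel : Nat) (i : Nat) (idx : List Nat) (dp : List Bool) : List Bool :=
  match fuel, idx with
  | 0, _ => dp
  | _, [] => dp
  | fuel+1, cur :: rest =>
    if s.getD cur ' ' = '<' then
      if cur = 0 then dp.set i true
      else
        if s.getD (cur-1) ' ' = '>' then dp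
        else if dp.getD (cur-1) false then dp.set i true
        else solLoop s fuel i ((cur-1) :: rest) dp
    else
      if cur = s.length - 1 then dp.set i true
      else
        if s.getD (cur+1) ' ' = '<' then dp
        else if dp.getD (cur+1) false then solLoop s fuel i ((cur+1) :: rest) (dp.set i true)
        else solLoop s fuel i ((cur+1) :: rest) dp

def solution (p : String) : Int :=
  let s := p.toList
  let res := (List.range s.length).foldl
    (fun st i =>
      let dp := solLoop s (2 * s.length + 2) i [i] st.2
      (st.1 + (if dp.getD i false then 1 else 0), dp))
    ((0 : Int), List.replicate s.length false)
  res.1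

-- ===== PORT B =====
-- `while a < n and p[a] == "<": a += 1`  (count of leading '<')
def bPrefix : List Char → Nat
  | [] => 0
  | c :: cs => if c = '<' then bPrefix cs + 1 else 0

-- `while b < n and p[n-1-b] != "<": b += 1`  (count of trailing non-'<', walked from the end)
def bSuffix : List Char → Nat
  | [] => 0
  | c :: cs => if c ≠ '<' then bSuffix cs + 1 else 0

def solution_alt (p : String) : Int :=
  ((bPrefix p.toList : Int) + (bSuffix p.toList.reverse : Int))

-- ===== PRECONDITION & SPEC =====
def Spec_solution (p : String) (out : Int) : Prop := out = solution_alt p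
instance (p : String) (out : Int) : Decidable (Spec_solution p out) := by unfold Spec_solution; infer_instance

-- ===== CLAIM (what is proved, stated in full; the proofs are below) =====
def Claim_equal_solution : Prop := ∀ (p : String), Dom_solution p → Spec_solution p (solution p)

-- ===== LEMMAS AND PROOFS =====

-- `pvSpec s i` = whether A's walk starting at i reaches its boundary (proved below):
-- a '<' position must have an all-'<' prefix, any other position a '<'-free suffix
def pvSpec (s : List Char) (i : Nat) : Bool :=
  if s.getD i ' ' = '<' then (s.take (i+1)).all (· == '<') else (s.drop (i+1)).all (· != '<')

-- the body of A's outer `for i in range(len(p))` loop, named so the invariant can be stated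
def pvStep (s : List Char) (st : Int × List Bool) (k : Nat) : Int × List Bool :=
  let dp := solLoop s (2 * s.length + 2) k [k] st.2
  (st.1 + (if dp.getD k false then 1 else 0), dp)

theorem pv_getD_set (l : List Bool) (i j : Nat) (a : Bool) :
    (l.set i a).getD j false = if i = j ∧ i < l.length then a else l.getD j false := by
  simp [List.getD_eq_getElem?_getD, List.getElem?_set]
  split_ifs with h1 h2 h3 <;> simp_all <;> omega

theorem pv_all_take (s : List Char) (m : Nat) (f : Char → Bool) :
    (s.take m).all f = true ↔ ∀ j, j < m → j < s.length → f (s.getD j ' ') := by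
  induction s generalizing m with
  | nil => simp
  | cons c cs ih =>
    cases m with
    | zero => simp
    | succ k =>
      simp only [List.take_succ_cons, List.all_cons, Bool.and_eq_true, ih]
      constructor
      · rintro ⟨h1, h2⟩ j hj hjl
        cases j with
        | zero => simpa using h1
        | succ j' => simpa using h2 j' (by omega) (by simpa using hjl)
      · intro h
        refine ⟨by simpa using h 0 (by omega) (by simp), fun j hj hjl => ?_⟩
        simpa using h (j+1) (by omega) (by simpa using hjl)

theorem pv_all_drop (s : List Char) (m : Nat) (f : Char → Bool) :
    (s.drop m).all f = true ↔ ∀ j, m ≤ j → j < s.length → f (s.getD j ' ') := by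
  induction s generalizing m with
  | nil => simp
  | cons c cs ih =>
    cases m with
    | zero =>
      simp only [List.drop_zero, List.all_cons, Bool.and_eq_true]
      constructor
      · rintro ⟨h1, h2⟩ j _ hjl
        cases j with
        | zero => simpa using h1
        | succ j' =>
          have := (ih 0).mp (by simpa using h2)
          simpa using this j' (by omega) (by simpa using hjl)
      · intro h
        refine ⟨by simpa using h 0 (by omega) (by simp), ?_⟩
        rw [show cs = cs.drop 0 from rfl, ih]
        intro j _ hjl
        simpa using h (j+1) (by omega) (by simpa using hjl)
    | succ k =>
      simp only [List.drop_succ_cons, ih]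
      constructor
      · intro h j hj hjl
        cases j with
        | zero => omega
        | succ j' => simpa using h j' (by omega) (by simpa using hjl)
      · intro h j hj hjl
        simpa using h (j+1) (by omega) (by simpa using hjl)

-- A's walk from a right-moving position: succeeds iff the suffix after it is '<'-free
theorem pv_walk_right (s : List Char) (i : Nat) (dp : List Bool)
    (H : ∀ j, i < j → dp.getD j false = false)
    (fuel cur : Nat) (rest : List Nat) (h1 : i ≤ cur) (h2 : cur < s.length)
    (h3 : s.length ≤ cur + fuel) (h4 : ¬ s.getD cur ' ' = '<') :
    solLoop s fuel i (cur :: rest) dp =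
      (if (s.drop (cur+1)).all (· != '<') then dp.set i true else dp) := by
  induction fuel generalizing cur with
  | zero => omega
  | succ f ih =>
    rw [solLoop, if_neg h4]
    by_cases hend : cur = s.length - 1
    · rw [if_pos hend]
      have hnil : s.drop (cur+1) = [] := List.drop_eq_nil_of_le (by omega)
      rw [hnil]; simp
    · rw [if_neg hend]
      have hcur1 : cur + 1 < s.length := by omega
      by_cases hch : s.getD (cur+1) ' ' = '<'
      · rw [if_pos hch, if_neg]
        intro hall
        have := (pv_all_drop s (cur+1) _).mp hall (cur+1) le_rfl hcur1
        simp [List.getD] at this hch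
        exact this hch
      · rw [if_neg hch, H (cur+1) (by omega)]
        simp only [Bool.false_eq_true, if_false]
        rw [ih (cur+1) (by omega) hcur1 (by omega) hch]
        have heq : ((s.drop (cur+1+1)).all (· != '<')) = ((s.drop (cur+1)).all (· != '<')) := by
          rw [Bool.eq_iff_iff, pv_all_drop, pv_all_drop]
          constructor
          · intro h j hj hjl
            rcases Nat.eq_or_lt_of_le hj with h' | h'
            · subst h'; simpa using hch
            · exact h j (by omega) hjl
          · intro h j hj hjl; exact h j (by omega) hjl
        rw [heq]

-- A's walk from a '<' position: succeeds iff everything up to it (inclusive) is '<';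
-- a memoised non-'<' neighbour is always False and the subsequent right step breaks at once
theorem pv_walk_left (s : List Char) (i : Nat) (i_lt : i < s.length)
    (dp : List Bool) (G : ∀ j, j < i → dp.getD j false = pvSpec s j)
    (fuel cur : Nat) (rest : List Nat) (hci : cur ≤ i) (hf : cur + 2 ≤ fuel)
    (hc : s.getD cur ' ' = '<') (hall : ∀ j, cur ≤ j → j ≤ i → s.getD j ' ' = '<') :
    solLoop s fuel i (cur :: rest) dp =
      (if (s.take (i+1)).all (· == '<') then dp.set i true else dp) := by
  induction fuel generalizing cur with
  | zero => omega
  | succ f ih =>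
    rw [solLoop, if_pos hc]
    by_cases h0 : cur = 0
    · rw [if_pos h0, if_pos]
      rw [pv_all_take]
      intro j hj hjl
      have := hall j (by omega) (by omega)
      simp [List.getD] at this ⊢
      simp [this]
    · rw [if_neg h0]
      have hklt : cur - 1 < i := by omega
      have hkl : cur - 1 < s.length := by omega
      by_cases hgt : s.getD (cur-1) ' ' = '>'
      · rw [if_pos hgt, if_neg]
        intro htk
        have := (pv_all_take s (i+1) _).mp htk (cur-1) (by omega) hkl
        simp [List.getD] at this hgt
        simp [hgt] at this
      · rw [if_neg hgt, G (cur-1) hklt]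
        by_cases hk : s.getD (cur-1) ' ' = '<'
        · -- previous char is '<': memoised prefix answer
          rw [pvSpec, if_pos hk]
          by_cases hmemo : (s.take (cur-1+1)).all (· == '<') = true
          · rw [hmemo, if_pos rfl, if_pos]
            rw [pv_all_take]
            intro j hj hjl
            by_cases hjc : j ≤ cur - 1
            · exact (pv_all_take s (cur-1+1) _).mp hmemo j (by omega) hjl
            · have := hall j (by omega) (by omega)
              simp [List.getD] at this ⊢
              simp [this]
          · simp only [Bool.not_eq_true] at hmemo
            rw [hmemo]
            simp only [Bool.false_eq_true, if_false]
            refine ih (cur-1) ?_ ?_ hk ?_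
            · omega
            · omega
            · intro j hj hjl
              rcases Nat.eq_or_lt_of_le hj with h' | h'
              · rw [← h']; exact hk
              · exact hall j (by omega) hjl
        · -- previous char is a right-mover: its memo is false, one right step breaks
          have hspec : pvSpec s (cur-1) = false := by
            rw [pvSpec, if_neg hk]
            rw [Bool.eq_false_iff]
            intro hd
            have := (pv_all_drop s (cur-1+1) _).mp hd cur (by omega) (by omega)
            simp [List.getD] at this hc
            exact this hc
          rw [hspec]
          simp only [Bool.false_eq_true, if_false]
          have hf1 : ∃ f', f = f' + 1 := ⟨f - 1, by omega⟩
          obtain ⟨f', rfl⟩ := hf1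
          rw [solLoop, if_neg hk, if_neg (by omega), if_pos (by
            have : cur - 1 + 1 = cur := by omega
            rw [this]; exact hc)]
          rw [if_neg]
          intro htk
          have := (pv_all_take s (i+1) _).mp htk (cur-1) (by omega) hkl
          simp [List.getD] at this hk
          exact hk this

-- invariant of A's outer loop: dp holds pvSpec below i and False from i on; the counter counts pvSpec
theorem pv_outer (s : List Char) (i : Nat) (hi : i ≤ s.length) :
    ((List.range i).foldl (pvStep s) ((0:Int), List.replicate s.length false)).2.length = s.length ∧
    (∀ j, ((List.range i).foldl (pvStep s) ((0:Int), List.replicate s.length false)).2.getD j false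
        = (decide (j < i) && pvSpec s j)) ∧
    ((List.range i).foldl (pvStep s) ((0:Int), List.replicate s.length false)).1
        = ((List.range i).countP (pvSpec s) : Int) := by
  induction i with
  | zero => simp
  | succ i ih =>
    obtain ⟨hlen, hdp, hcnt⟩ := ih (by omega)
    have hilt : i < s.length := by omega
    set st := (List.range i).foldl (pvStep s) ((0:Int), List.replicate s.length false) with hst
    rw [List.range_succ, List.foldl_append, List.foldl_cons, List.foldl_nil]
    have hG : ∀ j, j < i → st.2.getD j false = pvSpec s j := by
      intro j hj; rw [hdp j]; simp [hj]
    have hH : ∀ j, i < j → st.2.getD j false = false := by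
      intro j hj; rw [hdp j]; simp; omega
    have hA : ∀ j, i ≤ j → j ≤ i → s.getD i ' ' = '<' → s.getD j ' ' = '<' := by
      intro j h1 h2 hc
      have hji : j = i := by omega
      rw [hji]; exact hc
    have hdp' : (pvStep s st i).2 = (if pvSpec s i then st.2.set i true else st.2) := by
      simp only [pvStep]
      by_cases hc : s.getD i ' ' = '<'
      · rw [pv_walk_left s i hilt st.2 hG (2 * s.length + 2) i [] le_rfl (by omega) hc
            (fun j h1 h2 => hA j h1 h2 hc)]
        rw [pvSpec, if_pos hc]
      · rw [pv_walk_right s i st.2 hH (2 * s.length + 2) i [] le_rfl hilt (by omega) hc]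
        rw [pvSpec, if_neg hc]
    have hget : ∀ j, (pvStep s st i).2.getD j false = (decide (j < i + 1) && pvSpec s j) := by
      intro j
      rw [hdp']
      by_cases hsp : pvSpec s i = true
      · rw [if_pos hsp, pv_getD_set, hlen]
        by_cases hij : i = j
        · subst hij; simp [hilt, hsp]
        · rw [if_neg (by tauto), hdp j]
          congr 1
          simp; omega
      · simp only [Bool.not_eq_true] at hsp
        rw [hsp]
        simp only [Bool.false_eq_true, if_false, hdp j]
        by_cases hij : j = i
        · subst hij; simp [hsp]
        · congr 1; simp; omega
    refine ⟨?_, hget, ?_⟩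
    · rw [hdp']; split_ifs <;> simp [hlen]
    · have hfst : (pvStep s st i).1 = st.1 + (if pvSpec s i then 1 else 0) := by
        simp only [pvStep]
        rw [show (solLoop s (2 * s.length + 2) i [i] st.2) = (pvStep s st i).2 from rfl, hget i]
        simp
      rw [hfst, hcnt, List.countP_append]
      simp only [List.countP_cons, List.countP_nil]
      by_cases hsp : pvSpec s i = true <;> simp [hsp]

theorem pv_bPrefix_le (s : List Char) : bPrefix s ≤ s.length := by
  induction s with
  | nil => simp [bPrefix]
  | cons c cs ih => simp only [bPrefix, List.length_cons]; split_ifs <;> omega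

theorem pv_bPrefix_char (s : List Char) : ∀ j, j < bPrefix s → s.getD j ' ' = '<' := by
  induction s with
  | nil => simp [bPrefix]
  | cons c cs ih =>
    intro j hj
    simp only [bPrefix] at hj
    split_ifs at hj with hc
    · cases j with
      | zero => simpa using hc
      | succ j' => simpa using ih j' (by omega)
    · omega

theorem pv_bPrefix_end (s : List Char) : bPrefix s < s.length → ¬ s.getD (bPrefix s) ' ' = '<' := by
  induction s with
  | nil => simp
  | cons c cs ih =>
    simp only [bPrefix, List.length_cons]
    split_ifs with hc
    · intro h; simpa using ih (by omega)
    · intro _; simpa using hc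

theorem pv_bSuffix_le (s : List Char) : bSuffix s ≤ s.length := by
  induction s with
  | nil => simp [bSuffix]
  | cons c cs ih => simp only [bSuffix, List.length_cons]; split_ifs <;> omega

theorem pv_bSuffix_char (s : List Char) : ∀ j, j < bSuffix s → ¬ s.getD j ' ' = '<' := by
  induction s with
  | nil => simp [bSuffix]
  | cons c cs ih =>
    intro j hj
    simp only [bSuffix] at hj
    split_ifs at hj with hc
    · cases j with
      | zero => simpa using hc
      | succ j' => simpa using ih j' (by omega)
    · omega

theorem pv_bSuffix_end (s : List Char) : bSuffix s < s.length → s.getD (bSuffix s) ' ' = '<' := by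
  induction s with
  | nil => simp
  | cons c cs ih =>
    simp only [bSuffix, List.length_cons]
    split_ifs with hc
    · intro h; simpa using ih (by omega)
    · intro _; simp at hc; simpa using hc

theorem pv_getD_reverse (s : List Char) (k : Nat) (hk : k < s.length) :
    s.reverse.getD k ' ' = s.getD (s.length - 1 - k) ' ' := by
  rw [List.getD_eq_getElem (hn := by simpa using hk),
      List.getD_eq_getElem (hn := by omega)]
  simp [List.getElem_reverse]

theorem pv_suffix_char (s : List Char) (j : Nat)
    (h1 : s.length - bSuffix s.reverse ≤ j) (h2 : j < s.length) :
    ¬ s.getD j ' ' = '<' := by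
  have hb := pv_bSuffix_le s.reverse
  rw [List.length_reverse] at hb
  have hk : s.length - 1 - j < bSuffix s.reverse := by omega
  have := pv_bSuffix_char s.reverse (s.length - 1 - j) hk
  rw [pv_getD_reverse s (s.length - 1 - j) (by omega)] at this
  · have hjj : s.length - 1 - (s.length - 1 - j) = j := by omega
    rw [hjj] at this; exact this

theorem pv_suffix_end (s : List Char) (h : bSuffix s.reverse < s.length) :
    s.getD (s.length - 1 - bSuffix s.reverse) ' ' = '<' := by
  have := pv_bSuffix_end s.reverse (by simpa using h)
  rw [pv_getD_reverse s _ (by simpa using h)] at this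
  exact this

theorem pv_sum_le (s : List Char) : bPrefix s + bSuffix s.reverse ≤ s.length := by
  by_cases hb : bSuffix s.reverse = 0
  · rw [hb]; simpa using pv_bPrefix_le s
  · by_contra hcon
    have hbl := pv_bSuffix_le s.reverse
    rw [List.length_reverse] at hbl
    have h1 : s.length - bSuffix s.reverse < bPrefix s := by omega
    have h2 : s.length - bSuffix s.reverse < s.length := by omega
    have := pv_bPrefix_char s _ h1
    exact pv_suffix_char s _ le_rfl h2 this

-- the reachable positions are exactly the all-'<' prefix and the '<'-free suffix
theorem pv_spec_iff (s : List Char) (j : Nat) (hj : j < s.length) :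
    pvSpec s j = decide (j < bPrefix s ∨ s.length - bSuffix s.reverse ≤ j) := by
  have hbl := pv_bSuffix_le s.reverse
  rw [List.length_reverse] at hbl
  rw [Bool.eq_iff_iff, decide_eq_true_iff]
  unfold pvSpec
  by_cases hc : s.getD j ' ' = '<'
  · rw [if_pos hc, pv_all_take]
    constructor
    · intro h
      left
      by_contra hna
      have hal : bPrefix s < s.length := by omega
      have := h (bPrefix s) (by omega) hal
      simp [List.getD] at this
      exact pv_bPrefix_end s hal (by simpa [List.getD] using this)
    · rintro (h | h)
      · intro k hk hkl
        have := pv_bPrefix_char s k (by omega)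
        simp [List.getD] at this ⊢; exact this
      · exfalso
        exact pv_suffix_char s j h hj hc
  · rw [if_neg hc, pv_all_drop]
    constructor
    · intro h
      right
      by_contra hnb
      have hb1 : bSuffix s.reverse < s.length := by omega
      have hidx : j ≤ s.length - 1 - bSuffix s.reverse := by omega
      rcases Nat.eq_or_lt_of_le hidx with he | hlt
      · exact hc (he ▸ pv_suffix_end s hb1)
      · have := h (s.length - 1 - bSuffix s.reverse) (by omega) (by omega)
        have h2 := pv_suffix_end s hb1
        simp [List.getD] at this h2
        exact this h2
    · rintro (h | h)
      · exfalso
        exact hc (pv_bPrefix_char s j h)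
      · intro k hk hkl
        have := pv_suffix_char s k (by omega) hkl
        simp [List.getD] at this ⊢; exact this

theorem pv_count_ge (m d : Nat) :
    (List.range m).countP (fun k => decide (d ≤ k)) = m - d := by
  induction m with
  | zero => simp
  | succ n ih =>
    rw [List.range_succ, List.countP_append, ih]
    simp only [List.countP_cons, List.countP_nil]
    by_cases h : d ≤ n <;> simp [h] <;> omega

theorem pv_count_range (n a c : Nat) (hac : a ≤ c) (hcn : c ≤ n) :
    (List.range n).countP (fun j => decide (j < a ∨ c ≤ j)) = a + (n - c) := by
  have hsplit : n = a + (n - a) := by omega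
  rw [hsplit, List.range_add, List.countP_append, List.countP_map]
  have h1 : (List.range a).countP (fun j => decide (j < a ∨ c ≤ j)) = a := by
    have := List.countP_eq_length (p := fun j => decide (j < a ∨ c ≤ j)) (l := List.range a)
    rw [this.mpr (by intro x hx; simp at hx ⊢; omega)]
    simp
  rw [h1]
  have h2 : (List.range (n - a)).countP ((fun j => decide (j < a ∨ c ≤ j)) ∘ (a + ·)) =
      (List.range (n - a)).countP (fun k => decide (c - a ≤ k)) := by
    apply List.countP_congr
    intro x hx; simp at hx ⊢; omega
  rw [h2, pv_count_ge]
  omega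

-- ===== VERDICT (by name: the statement is the Claim_ definition above) =====
theorem solution_spec : Claim_equal_solution := by
  intro p _
  unfold Spec_solution
  have hA : solution p =
      ((List.range p.toList.length).foldl (pvStep p.toList)
        ((0:Int), List.replicate p.toList.length false)).1 := rfl
  obtain ⟨-, -, hcnt⟩ := pv_outer p.toList p.toList.length le_rfl
  rw [hA, hcnt]
  have hcong : (List.range p.toList.length).countP (pvSpec p.toList) =
      (List.range p.toList.length).countP
        (fun j => decide (j < bPrefix p.toList ∨
          p.toList.length - bSuffix p.toList.reverse ≤ j)) := by
    apply List.countP_congr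
    intro j hj
    rw [pv_spec_iff p.toList j (by simpa using hj)]
  have hsum := pv_sum_le p.toList
  rw [hcong, pv_count_range _ _ _ (by omega) (by omega)]
  unfold solution_alt
  have hble := pv_bSuffix_le p.toList.reverse
  rw [List.length_reverse] at hble
  push_cast
  omega
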